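-- pv_equiv track=rewrite | github.com/TaimoorTech/CodingProjects | DSA labs/lab 5 (a).py | RETRIEVE_TRIANGULAR
-- ===== SOURCE A (Python) =====
-- def RETRIEVE_TRIANGULAR(U, n):
--     A = []
--
--     for i in range(n):
--         new_lst = []
--         for z in range(n):
--             new_lst.append(0)
--         A.append(new_lst)
--
--     for j in range(n):
--         for k in range(n):
--             if k > j:
--                 A[j][k] = 0
--             else:
--                 A[j][k] = U[int(0.5*j*(j+1)+k)]
--
--     return A
-- ===== SOURCE B (Python) =====
-- def RETRIEVE_TRIANGULAR(U, n):
--     # Single pass: consume U sequentially through an iterator; no zero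
--     # matrix is pre-allocated and no index formula is recomputed.
--     it = iter(U)
--     return [[next(it) if k <= j else 0 for k in range(n)] for j in range(n)]
-- ===== Notes on version B (the rewrite author's own statement) =====
-- stated objective: simpler
-- what changed: B builds the matrix in one pass by consuming U sequentially through an iterator, instead of A's two phases (allocate a zero matrix, then overwrite every cell via the float index formula 0.5*j*(j+1)+k).
import Mathlib
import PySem

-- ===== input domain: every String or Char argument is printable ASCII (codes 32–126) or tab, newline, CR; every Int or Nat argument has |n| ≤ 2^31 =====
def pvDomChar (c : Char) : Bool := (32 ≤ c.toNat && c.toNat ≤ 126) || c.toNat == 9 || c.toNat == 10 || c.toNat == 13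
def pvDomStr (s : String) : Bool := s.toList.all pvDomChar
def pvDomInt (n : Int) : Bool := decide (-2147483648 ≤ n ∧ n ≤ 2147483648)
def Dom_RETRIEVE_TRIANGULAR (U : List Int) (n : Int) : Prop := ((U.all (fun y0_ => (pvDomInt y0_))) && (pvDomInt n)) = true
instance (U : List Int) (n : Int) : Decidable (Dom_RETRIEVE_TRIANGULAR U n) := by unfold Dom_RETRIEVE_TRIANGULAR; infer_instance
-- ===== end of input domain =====

-- B replaces A's two phases (allocate a zero matrix, then overwrite each cell via an
-- index formula) with one sequential pass consuming U through an iterator; objective: simpler.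


-- ===== PORT A =====
-- Literal transliteration of A.  'int(0.5*j*(j+1)+k)' is ported as (j*(j+1))//2 + k:
-- j*(j+1) is even, so 0.5*j*(j+1) is an exact float and int() of it equals the floor
-- division for every index a list U can actually reach.  U[idx] (idx ≥ 0 here) is
-- pyGetD, exact under Pre_ (the IndexError inputs are excluded there); A[j][k] = v is
-- pySetD/pyGetD with j, k produced by range(n), hence always in range.
def RETRIEVE_TRIANGULAR (U : List Int) (n : Int) : List (List Int) :=
  let A : List (List Int) :=
    (PySem.List.pyRange 0 n 1).foldl (fun A _i =>
      let newLst : List Int := (PySem.List.pyRange 0 n 1).foldl (fun r _z => r ++ [(0 : Int)]) []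
      A ++ [newLst]) []
  (PySem.List.pyRange 0 n 1).foldl (fun A j =>
    (PySem.List.pyRange 0 n 1).foldl (fun A k =>
      if k > j then
        PySem.List.pySetD A j (PySem.List.pySetD (PySem.List.pyGetD A j []) k 0)
      else
        PySem.List.pySetD A j (PySem.List.pySetD (PySem.List.pyGetD A j []) k
          (PySem.List.pyGetD U (PySem.Int.floordiv (j * (j + 1)) 2 + k) 0))) A) A

-- ===== PORT B =====
-- B's inner comprehension: walk the ks, 'next(it)' takes the head of the remaining
-- iterator state.  On an exhausted iterator Python raises StopIteration — those inputs
-- are excluded by Pre_; there the port yields 0 (unreachable under Pre_).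
def pvRowB (j : Int) (ks : List Int) (rest : List Int) : List Int × List Int :=
  match ks with
  | [] => ([], rest)
  | k :: ks' =>
    if k ≤ j then
      match rest with
      | [] => let p := pvRowB j ks' []; (0 :: p.1, p.2)
      | x :: xs => let p := pvRowB j ks' xs; (x :: p.1, p.2)
    else
      let p := pvRowB j ks' rest; (0 :: p.1, p.2)

-- B's outer comprehension: one row per j, threading the iterator state through.
def pvRowsB (js : List Int) (n : Int) (rest : List Int) : List (List Int) :=
  match js with
  | [] => []
  | j :: js' =>
    let p := pvRowB j (PySem.List.pyRange 0 n 1) rest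
    p.1 :: pvRowsB js' n p.2

def RETRIEVE_TRIANGULAR_alt (U : List Int) (n : Int) : List (List Int) :=
  pvRowsB (PySem.List.pyRange 0 n 1) n U

-- ===== PRECONDITION & SPEC =====
-- Pre_ excludes exactly the inputs where the Pythons raise: for 0 < n both need
-- n*(n+1)/2 elements of U (A raises IndexError, B raises StopIteration there).
def Pre_RETRIEVE_TRIANGULAR (U : List Int) (n : Int) : Prop :=
  n ≤ 0 ∨ n * (n + 1) ≤ 2 * (U.length : Int)
instance (U : List Int) (n : Int) : Decidable (Pre_RETRIEVE_TRIANGULAR U n) := by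
  unfold Pre_RETRIEVE_TRIANGULAR; infer_instance
def pvWitness_RETRIEVE_TRIANGULAR : List Int × Int := ([5, 1, 2, 3, 4, 6], 3)

def Spec_RETRIEVE_TRIANGULAR (U : List Int) (n : Int) (out : List (List Int)) : Prop := out = RETRIEVE_TRIANGULAR_alt U n
instance (U : List Int) (n : Int) (out : List (List Int)) : Decidable (Spec_RETRIEVE_TRIANGULAR U n out) := by unfold Spec_RETRIEVE_TRIANGULAR; infer_instance

-- ===== CLAIM (what is proved, stated in full; the proofs are below) =====
def Claim_equal_RETRIEVE_TRIANGULAR : Prop := ∀ (U : List Int) (n : Int), Dom_RETRIEVE_TRIANGULAR U n → Pre_RETRIEVE_TRIANGULAR U n → Spec_RETRIEVE_TRIANGULAR U n (RETRIEVE_TRIANGULAR U n)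

-- ===== LEMMAS AND PROOFS =====

-- the common closed form both ports are reduced to
def pvTargetRow (U : List Int) (b j : ℕ) : List Int :=
  (List.range b).map (fun k => if k ≤ j then U.getD (j * (j + 1) / 2 + k) 0 else 0)

def pvTarget (U : List Int) (b : ℕ) : List (List Int) :=
  (List.range b).map (fun j => pvTargetRow U b j)

-- generic loop shape: overwrite slot i with g i (old value at i), for i = 0..m-1
lemma pvFoldlSet {α : Type} (g : ℕ → α → α) (d : α) :
    ∀ (m : ℕ) (M : List α), m ≤ M.length →
      List.foldl (fun M i => M.set i (g i (M.getD i d))) M (List.range m)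
        = (List.range m).map (fun i => g i (M.getD i d)) ++ M.drop m := by
  intro m
  induction m with
  | zero => intro M _; simp
  | succ m ih =>
    intro M hm
    have hmlt : m < M.length := by omega
    rw [List.range_succ, List.foldl_append, List.foldl_cons, List.foldl_nil,
        ih M (by omega), List.map_append]
    have hdrop : List.drop m M = M[m] :: List.drop (m + 1) M := List.drop_eq_getElem_cons hmlt
    have hlen : (List.map (fun i => g i (M.getD i d)) (List.range m)).length = m := by simp
    rw [hdrop]
    have hgetd : (List.map (fun i => g i (M.getD i d)) (List.range m) ++ M[m] :: List.drop (m + 1) M).getD m d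
        = M[m] := by
      rw [List.getD_eq_getElem?_getD, List.getElem?_append_right (by omega), hlen, Nat.sub_self]
      simp [List.getElem?_eq_getElem hmlt]
    rw [hgetd, List.set_append_right _ _ (by omega), hlen, Nat.sub_self, List.set_cons_zero]
    simp [List.getElem?_eq_getElem hmlt]

-- ---- Port A = pvTarget ----

lemma pvRowZeros {β : Type} (L : List β) : ∀ r : List Int,
    L.foldl (fun r _ => r ++ [(0 : Int)]) r = r ++ List.replicate L.length 0 := by
  induction L with
  | nil => simp
  | cons x xs ih =>
    intro r
    simp only [List.foldl_cons, ih, List.length_cons, List.replicate_succ,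
      List.append_assoc, List.singleton_append]

lemma pvPhase1 {β : Type} (L : List β) (row : List Int) : ∀ M : List (List Int),
    L.foldl (fun M _ => M ++ [row]) M = M ++ List.replicate L.length row := by
  induction L with
  | nil => simp
  | cons x xs ih =>
    intro M
    simp only [List.foldl_cons, ih, List.length_cons, List.replicate_succ,
      List.append_assoc, List.singleton_append]

-- the inner k-loop only touches row j
lemma pvInner (v : ℕ → Int) (j : ℕ) (ks : List ℕ) :
    ∀ (A : List (List Int)),
      ks.foldl (fun A k => A.set j ((A.getD j []).set k (v k))) A
        = A.set j (ks.foldl (fun r k => r.set k (v k)) (A.getD j [])) := by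
  induction ks with
  | nil =>
    intro A
    simp only [List.foldl_nil]
    by_cases hj : j < A.length
    · rw [List.getD_eq_getElem A [] hj, List.set_getElem_self hj]
    · rw [List.set_eq_of_length_le (by omega)]
  | cons k ks ih =>
    intro A
    simp only [List.foldl_cons]
    rw [ih, List.set_set]
    by_cases hj : j < A.length
    · rw [List.getD_eq_getElem?_getD (l := A.set j ((A.getD j []).set k (v k))),
          List.getElem?_set_self (by omega), Option.getD_some]
    · simp only [List.set_eq_of_length_le (by omega : A.length ≤ j)]

lemma pvIdxCast (j k : ℕ) :
    PySem.Int.floordiv ((j : Int) * ((j : Int) + 1)) 2 + (k : Int)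
      = ((j * (j + 1) / 2 + k : ℕ) : Int) := by
  have h1 : (j : Int) * ((j : Int) + 1) = ((j * (j + 1) : ℕ) : Int) := by push_cast; ring
  have h2 : (2 : Int) = ((2 : ℕ) : Int) := by norm_num
  rw [h1, h2, PySem.Int.floordiv_natCast]
  push_cast; ring

-- the transliterated inner loop, in canonical set-form
lemma pvInnerA (U : List Int) (b j : ℕ) (A : List (List Int)) :
    List.foldl (fun (A : List (List Int)) (k : ℕ) =>
      if ((k : Int)) > ((j : Int)) then
        PySem.List.pySetD A ((j : Int)) (PySem.List.pySetD (PySem.List.pyGetD A ((j : Int)) []) ((k : Int)) 0)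
      else
        PySem.List.pySetD A ((j : Int)) (PySem.List.pySetD (PySem.List.pyGetD A ((j : Int)) []) ((k : Int))
          (PySem.List.pyGetD U (PySem.Int.floordiv ((j : Int) * ((j : Int) + 1)) 2 + (k : Int)) 0)))
      A (List.range b)
    = A.set j (List.foldl (fun r k => r.set k (if k ≤ j then U.getD (j * (j + 1) / 2 + k) 0 else 0))
        (A.getD j []) (List.range b)) := by
  refine Eq.trans (List.foldl_ext _ _ A ?_)
    (pvInner (fun k => if k ≤ j then U.getD (j * (j + 1) / 2 + k) 0 else 0) j (List.range b) A)
  intro A' k _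
  by_cases hkj : k ≤ j
  · rw [if_neg (by omega : ¬ ((k : Int) > (j : Int))), if_pos hkj, pvIdxCast]
    simp only [PySem.List.pySetD_natCast, PySem.List.pyGetD_natCast]
  · rw [if_pos (by omega : ((k : Int) > (j : Int))), if_neg hkj]
    simp only [PySem.List.pySetD_natCast, PySem.List.pyGetD_natCast]

-- one overwritten row of the zero matrix is the target row
lemma pvRowA (U : List Int) (b j : ℕ) :
    List.foldl (fun r k => r.set k (if k ≤ j then U.getD (j * (j + 1) / 2 + k) 0 else 0))
      (List.replicate b (0 : Int)) (List.range b) = pvTargetRow U b j := by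
  have h := pvFoldlSet (fun (k : ℕ) (_ : Int) => if k ≤ j then U.getD (j * (j + 1) / 2 + k) 0 else 0)
    0 b (List.replicate b 0) (by simp)
  simpa [pvTargetRow] using h

lemma pvA_eq (U : List Int) (b : ℕ) :
    RETRIEVE_TRIANGULAR U (b : Int) = pvTarget U b := by
  unfold RETRIEVE_TRIANGULAR
  have hr : PySem.List.pyRange 0 (b : Int) 1 = List.map (fun (k : ℕ) => (k : Int)) (List.range b) := by
    rw [PySem.List.pyRange_one]
    rw [show ((b : Int) - 0).toNat = b from by simp]
    exact List.map_congr_left (fun k _ => by omega)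
  simp only [hr, List.foldl_map]
  rw [pvRowZeros, pvPhase1]
  simp only [List.nil_append, List.length_range]
  refine Eq.trans (List.foldl_ext _ (fun (A : List (List Int)) (j : ℕ) =>
      A.set j (List.foldl (fun r k => r.set k (if k ≤ j then U.getD (j * (j + 1) / 2 + k) 0 else 0))
        (A.getD j []) (List.range b))) _
      (fun A j _ => pvInnerA U b j A)) ?_
  refine Eq.trans (pvFoldlSet (fun (j : ℕ) (r : List Int) =>
      List.foldl (fun r k => r.set k (if k ≤ j then U.getD (j * (j + 1) / 2 + k) 0 else 0)) r (List.range b))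
      [] b _ (by simp)) ?_
  unfold pvTarget
  simp only [List.drop_replicate, Nat.sub_self, List.replicate_zero, List.append_nil]
  apply List.map_congr_left
  intro j hj
  rw [List.getD_replicate _ (List.mem_range.mp hj)]
  exact pvRowA U b j

-- ---- Port B = pvTarget ----

lemma pvRowB_all_le (j : Int) :
    ∀ (ks rest : List Int), (∀ k ∈ ks, k ≤ j) →
      pvRowB j ks rest = ((List.range ks.length).map (fun i => rest.getD i 0), rest.drop ks.length) := by
  intro ks
  induction ks with
  | nil => intro rest _; simp [pvRowB]
  | cons k ks ih =>
    intro rest h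
    have hk : k ≤ j := h k (by simp)
    cases rest with
    | nil =>
      simp only [pvRowB, if_pos hk]
      rw [ih [] (fun k hk' => h k (List.mem_cons_of_mem _ hk'))]
      simp [List.range_succ_eq_map, List.map_map, Function.comp_def,
        List.getD_eq_getElem?_getD]
    | cons x xs =>
      simp only [pvRowB, if_pos hk]
      rw [ih xs (fun k hk' => h k (List.mem_cons_of_mem _ hk'))]
      simp [List.range_succ_eq_map, List.map_map, Function.comp_def,
        List.getD_cons_zero, List.getD_cons_succ]

lemma pvRowB_all_gt (j : Int) :
    ∀ (ks rest : List Int), (∀ k ∈ ks, j < k) →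
      pvRowB j ks rest = (List.replicate ks.length 0, rest) := by
  intro ks
  induction ks with
  | nil => intro rest _; simp [pvRowB]
  | cons k ks ih =>
    intro rest h
    have hk : ¬ (k ≤ j) := by have := h k (by simp); omega
    simp only [pvRowB, if_neg hk]
    rw [ih rest (fun k hk' => h k (List.mem_cons_of_mem _ hk'))]
    simp [List.replicate_succ]

lemma pvRowB_append (j : Int) :
    ∀ (ks ks' rest : List Int),
      pvRowB j (ks ++ ks') rest
        = ((pvRowB j ks rest).1 ++ (pvRowB j ks' (pvRowB j ks rest).2).1,
           (pvRowB j ks' (pvRowB j ks rest).2).2) := by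
  intro ks
  induction ks with
  | nil => intro ks' rest; simp [pvRowB]
  | cons k ks ih =>
    intro ks' rest
    simp only [List.cons_append, pvRowB]
    by_cases hk : k ≤ j
    · cases rest with
      | nil => simp [if_pos hk, ih]
      | cons x xs => simp [if_pos hk, ih]
    · simp [if_neg hk, ih]

lemma pvRowB_range (b j : ℕ) (hj : j < b) (rest : List Int) :
    pvRowB (j : Int) (PySem.List.pyRange 0 (b : Int) 1) rest
      = ((List.range (j + 1)).map (fun i => rest.getD i 0) ++ List.replicate (b - (j + 1)) 0,
         rest.drop (j + 1)) := by
  have hsplit : PySem.List.pyRange 0 (b : Int) 1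
      = PySem.List.pyRange 0 (((j + 1 : ℕ) : Int)) 1
        ++ PySem.List.pyRange (((j + 1 : ℕ) : Int)) (b : Int) 1 :=
    PySem.List.pyRange_one_append _ _ _ (by exact_mod_cast Nat.zero_le _) (by exact_mod_cast hj)
  rw [hsplit, pvRowB_append]
  rw [pvRowB_all_le _ _ _ (fun k hk => by
        have := (PySem.List.mem_pyRange_one).mp hk
        omega)]
  rw [pvRowB_all_gt _ _ _ (fun k hk => by
        have := (PySem.List.mem_pyRange_one).mp hk
        omega)]
  have e1 : ((((j + 1 : ℕ) : Int)) - 0).toNat = j + 1 := by omega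
  have e2 : (((b : Int)) - (((j + 1 : ℕ) : Int))).toNat = b - (j + 1) := by omega
  simp [PySem.List.length_pyRange_one]
  omega

lemma pvRow_head (U : List Int) (b a : ℕ) (hab : a < b) :
    (List.range (a + 1)).map (fun i => (U.drop (a * (a + 1) / 2)).getD i 0)
        ++ List.replicate (b - (a + 1)) 0
      = pvTargetRow U b a := by
  unfold pvTargetRow
  have hr2 : List.range b = List.range (a + 1) ++ (List.range (b - (a + 1))).map ((a + 1) + ·) := by
    rw [← List.range_add]; congr 1; omega
  rw [hr2, List.map_append]
  congr 1
  · apply List.map_congr_left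
    intro i hi
    have hia : i < a + 1 := List.mem_range.mp hi
    rw [if_pos (by omega)]
    rw [List.getD_eq_getElem?_getD, List.getElem?_drop, ← List.getD_eq_getElem?_getD]
  · rw [List.map_map]
    symm
    rw [List.map_congr_left (g := Function.const ℕ (0 : Int)) (fun i _ => by
          simp only [Function.comp_apply, Function.const_apply]
          rw [if_neg (by omega)]),
        List.map_const, List.length_range]

lemma pvTriStep (a : ℕ) : a * (a + 1) / 2 + (a + 1) = (a + 1) * (a + 2) / 2 := by
  have h2 : (a + 1) * (a + 2) = a * (a + 1) + (a + 1) * 2 := by ring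
  rw [h2, Nat.add_mul_div_right _ _ (by omega : 0 < 2)]

lemma pvRowsB_eq (U : List Int) (b : ℕ) :
    ∀ (c a : ℕ), a + c = b →
      pvRowsB (PySem.List.pyRange (a : Int) (b : Int) 1) (b : Int) (U.drop (a * (a + 1) / 2))
        = (List.range c).map (fun i => pvTargetRow U b (a + i)) := by
  intro c
  induction c with
  | zero =>
    intro a ha
    rw [PySem.List.pyRange_one_eq_nil (by omega)]
    simp [pvRowsB]
  | succ c ih =>
    intro a ha
    rw [PySem.List.pyRange_one_cons (by exact_mod_cast (by omega : a < b))]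
    simp only [pvRowsB]
    rw [pvRowB_range b a (by omega)]
    dsimp only
    rw [pvRow_head U b a (by omega)]
    rw [List.drop_drop]
    rw [show a * (a + 1) / 2 + (a + 1) = (a + 1) * (a + 1 + 1) / 2 from pvTriStep a]
    rw [show ((a : Int) + 1) = (((a + 1 : ℕ) : Int)) from by push_cast; ring]
    rw [ih (a + 1) (by omega)]
    have htail : List.map (fun i => pvTargetRow U b (a + 1 + i)) (List.range c)
        = List.map ((fun i => pvTargetRow U b (a + i)) ∘ Nat.succ) (List.range c) :=
      List.map_congr_left (fun i _ => by
        simp only [Function.comp_apply]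
        congr 1
        omega)
    rw [List.range_succ_eq_map, List.map_cons, List.map_map, ← htail]
    simp

lemma pvB_eq (U : List Int) (b : ℕ) :
    RETRIEVE_TRIANGULAR_alt U (b : Int) = pvTarget U b := by
  unfold RETRIEVE_TRIANGULAR_alt pvTarget
  have h := pvRowsB_eq U b b 0 (by omega)
  norm_num at h
  exact h

-- ===== VERDICT (by name: the statement is the Claim_ definition above) =====
theorem RETRIEVE_TRIANGULAR_spec : Claim_equal_RETRIEVE_TRIANGULAR := by
  intro U n _ _
  unfold Spec_RETRIEVE_TRIANGULAR
  by_cases hn : n ≤ 0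
  · have h1 : PySem.List.pyRange 0 n 1 = [] := PySem.List.pyRange_one_eq_nil hn
    simp [RETRIEVE_TRIANGULAR, RETRIEVE_TRIANGULAR_alt, pvRowsB, h1]
  · have hn' : n = ((n.toNat : ℕ) : Int) := by omega
    rw [hn', pvA_eq, pvB_eq]
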